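-- pv_equiv track=rewrite | github.com/Kalkulus1/python-recap | random_tests/plus_mult.py | plusMult
-- ===== SOURCE A (Python) =====
-- def plusMult(A):
--
--     r_even = 0
--
--     r_odd = 0
--
--     arr_len = len(A)
--
--     for i in range(0, arr_len, 4):
--         r_even = (r_even + A[i])
--         if i + 2 < arr_len:
--             r_even = r_even * A[i+2]
--
--     for i in range(1, arr_len, 4):
--         r_odd = (r_odd + A[i])
--         if i + 2 < arr_len:
--             r_odd = r_odd * A[i+2]
--
--     r_even = r_even % 2
--     r_odd = r_odd % 2
--
--     if r_odd > r_even: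
--         return "ODD"
--
--     elif r_even > r_odd:
--         return "EVEN"
--
--     else:
--         return "NEUTRAL"
-- ===== SOURCE B (Python) =====
-- def plusMult(A):
--     pe = 0
--     po = 0
--     for j, a in enumerate(A):
--         r = j % 4
--         if r == 0:
--             pe = (pe + a) % 2
--         elif r == 1:
--             po = (po + a) % 2
--         elif r == 2:
--             pe = (pe * a) % 2
--         else:
--             po = (po * a) % 2
--     if po > pe:
--         return "ODD"
--     if pe > po:
--         return "EVEN"
--     return "NEUTRAL"
-- ===== Notes on version B (the rewrite author's own statement) =====
-- stated objective: faster
-- what changed: Replaces the two stride-4 index loops over unbounded integer accumulators by a single enumerate pass that keeps only the two parity bits, reducing each accumulator mod 2 at every step so bignums never grow.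
import Mathlib
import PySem

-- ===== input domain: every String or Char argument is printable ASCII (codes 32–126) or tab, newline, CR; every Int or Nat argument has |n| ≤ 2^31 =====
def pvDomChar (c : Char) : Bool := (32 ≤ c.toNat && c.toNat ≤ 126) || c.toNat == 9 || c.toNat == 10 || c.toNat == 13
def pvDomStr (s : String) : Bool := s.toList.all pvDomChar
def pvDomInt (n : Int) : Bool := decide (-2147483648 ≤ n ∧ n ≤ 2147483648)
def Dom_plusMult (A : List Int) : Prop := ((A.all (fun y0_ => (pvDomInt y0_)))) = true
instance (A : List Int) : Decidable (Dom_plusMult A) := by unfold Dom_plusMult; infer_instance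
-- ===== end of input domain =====

-- B replaces A's two stride-4 index loops over ever-growing integer accumulators by one
-- enumerate pass keeping only the two parity bits (each accumulator reduced mod 2 at every step).

-- ===== PORT A =====
-- A[i] is ported as pyGetD with default 0: every index produced by range(0/1, len(A), 4)
-- (and i+2 under the guard i+2 < len(A)) is in range, so the default is never used — exact.
def plusMult (A : List Int) : String :=
  let arrLen : Int := (A.length : Int)
  let rEven : Int :=
    (PySem.List.pyRange 0 arrLen 4).foldl
      (fun r i =>
        let r := r + PySem.List.pyGetD A i 0
        if i + 2 < arrLen then r * PySem.List.pyGetD A (i + 2) 0 else r) 0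
  let rOdd : Int :=
    (PySem.List.pyRange 1 arrLen 4).foldl
      (fun r i =>
        let r := r + PySem.List.pyGetD A i 0
        if i + 2 < arrLen then r * PySem.List.pyGetD A (i + 2) 0 else r) 0
  let rEven := PySem.Int.mod rEven 2
  let rOdd := PySem.Int.mod rOdd 2
  if rOdd > rEven then "ODD"
  else if rEven > rOdd then "EVEN"
  else "NEUTRAL"

-- ===== PORT B =====
def plusMult_alt (A : List Int) : String :=
  let p : Int × Int :=
    (PySem.List.enumerate A 0).foldl
      (fun st ja =>
        let r := PySem.Int.mod ja.1 4
        if r = 0 then (PySem.Int.mod (st.1 + ja.2) 2, st.2)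
        else if r = 1 then (st.1, PySem.Int.mod (st.2 + ja.2) 2)
        else if r = 2 then (PySem.Int.mod (st.1 * ja.2) 2, st.2)
        else (st.1, PySem.Int.mod (st.2 * ja.2) 2))
      (0, 0)
  if p.2 > p.1 then "ODD"
  else if p.1 > p.2 then "EVEN"
  else "NEUTRAL"

-- ===== PRECONDITION & SPEC =====
def Spec_plusMult (A : List Int) (out : String) : Prop := out = plusMult_alt A
instance (A : List Int) (out : String) : Decidable (Spec_plusMult A out) := by unfold Spec_plusMult; infer_instance

-- ===== CLAIM (what is proved, stated in full; the proofs are below) =====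
def Claim_equal_plusMult : Prop := ∀ (A : List Int), Dom_plusMult A → Spec_plusMult A (plusMult A)

-- ===== LEMMAS AND PROOFS =====

def evenAcc (x : Int) : List Int → Int
  | [] => x
  | [a] => x + a
  | [a, _] => x + a
  | [a, _, c] => (x + a) * c
  | a :: _ :: c :: _ :: rest => evenAcc ((x + a) * c) rest

lemma pyGetD_drop (A : List Int) (m k : Nat) :
    PySem.List.pyGetD A ((m : Int) + (k : Int)) 0 = (A.drop m).getD k 0 := by
  rw [PySem.List.pyGetD_of_nonneg _ _ (by positivity)]
  have h : ((m : Int) + (k : Int)).toNat = m + k := by omega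
  rw [h]
  simp [List.getD_eq_getElem?_getD, List.getElem?_drop]

lemma pyRange4_cons (a b : Int) (h : a < b) :
    PySem.List.pyRange a b 4 = a :: PySem.List.pyRange (a + 4) b 4 := by
  rw [PySem.List.pyRange_of_pos a b (by norm_num), PySem.List.pyRange_of_pos (a+4) b (by norm_num)]
  have hcnt : (if a < b then ((b - a + 4 - 1) / 4).toNat else 0)
      = (if a + 4 < b then ((b - (a+4) + 4 - 1) / 4).toNat else 0) + 1 := by
    split_ifs <;> omega
  rw [hcnt, List.range_succ_eq_map]
  simp only [List.map_cons, List.map_map, Nat.cast_zero, mul_zero, add_zero]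
  congr 1
  exact List.map_congr_left fun k _ => by simp [Function.comp]; ring

lemma pyRange4_nil (a b : Int) (h : b ≤ a) : PySem.List.pyRange a b 4 = [] := by
  rw [PySem.List.pyRange_of_pos a b (by norm_num)]
  rw [if_neg (by omega)]
  simp

lemma foldA_fuel (A : List Int) : ∀ (n : Nat) (m : Nat) (x : Int), A.length ≤ m + n →
    (PySem.List.pyRange (m : Int) (A.length : Int) 4).foldl
      (fun r i =>
        let r := r + PySem.List.pyGetD A i 0
        if i + 2 < (A.length : Int) then r * PySem.List.pyGetD A (i + 2) 0 else r) x
    = evenAcc x (A.drop m) := by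
  intro n
  induction n with
  | zero =>
    intro m x h
    rw [pyRange4_nil _ _ (by exact_mod_cast by omega)]
    rw [List.drop_eq_nil_of_le (by omega)]
    simp [evenAcc]
  | succ n ih =>
    intro m x h
    by_cases hlt : m < A.length
    · rw [pyRange4_cons _ _ (by exact_mod_cast hlt)]
      rw [List.foldl_cons]
      have hg0 : PySem.List.pyGetD A (m : Int) 0 = (A.drop m).getD 0 0 := by
        simpa using pyGetD_drop A m 0
      have hg2 : PySem.List.pyGetD A ((m : Int) + 2) 0 = (A.drop m).getD 2 0 := by
        simpa using pyGetD_drop A m 2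
      have hm4 : ((m : Int) + 4) = ((m + 4 : Nat) : Int) := by push_cast; ring
      have hlen : (A.drop m).length = A.length - m := by simp
      rw [hm4, ih (m + 4) _ (by omega)]
      have hdd : A.drop (m + 4) = (A.drop m).drop 4 := by
        rw [List.drop_drop]
      rw [hdd]
      have hcond : ((m : Int) + 2 < (A.length : Int)) ↔ 2 < (A.drop m).length := by
        rw [hlen]; omega
      -- now case on the shape of A.drop m
      rcases hD : A.drop m with _ | ⟨d0, _ | ⟨d1, _ | ⟨d2, _ | ⟨d3, T⟩⟩⟩⟩
      · exfalso; have := congrArg List.length hD; simp at this; omega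
      · rw [hD] at hg0 hcond; simp at hg0 hcond
        simp [hg0, evenAcc, hcond]
      · rw [hD] at hg0 hcond; simp at hg0 hcond
        simp [hg0, evenAcc, hcond]
      · rw [hD] at hg0 hg2 hcond; simp at hg0 hg2 hcond
        simp [hg0, hg2, evenAcc, hcond]
      · rw [hD] at hg0 hg2 hcond
        have hc : ((m:Int) + 2 < (A.length:Int)) := by simp at hcond; omega
        simp at hg0 hg2
        simp [hg0, hg2, evenAcc, hc]
    · rw [pyRange4_nil _ _ (by exact_mod_cast by omega)]
      rw [List.drop_eq_nil_of_le (by omega)]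
      simp [evenAcc]

lemma emodAdd (x a : Int) : (x % 2 + a) % 2 = (x + a) % 2 := by omega

lemma emodMul (x a : Int) : (x % 2 * a) % 2 = (x * a) % 2 := by
  conv_lhs => rw [Int.mul_emod]
  conv_rhs => rw [Int.mul_emod]
  simp [Int.emod_emod_of_dvd]

lemma foldB_fuel : ∀ (n : Nat) (T : List Int) (k x y : Int), T.length ≤ n →
    (PySem.List.enumerate T (4 * k)).foldl
      (fun st ja =>
        let r := PySem.Int.mod ja.1 4
        if r = 0 then (PySem.Int.mod (st.1 + ja.2) 2, st.2)
        else if r = 1 then (st.1, PySem.Int.mod (st.2 + ja.2) 2)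
        else if r = 2 then (PySem.Int.mod (st.1 * ja.2) 2, st.2)
        else (st.1, PySem.Int.mod (st.2 * ja.2) 2))
      (PySem.Int.mod x 2, PySem.Int.mod y 2)
    = (PySem.Int.mod (evenAcc x T) 2, PySem.Int.mod (evenAcc y T.tail) 2) := by
  intro n
  induction n with
  | zero =>
    intro T k x y h
    have : T = [] := by rw [← List.length_eq_zero_iff]; omega
    subst this
    simp [evenAcc]
  | succ n ih =>
    intro T k x y h
    have hdvd0 : (4:Int) ∣ 4 * k := dvd_mul_right 4 k
    have hnd1 : ¬ (4:Int) ∣ (4 * k + 1) := by omega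
    have hm1 : (4 * k + 1) % 4 = 1 := by omega
    have hnd2 : ¬ (4:Int) ∣ (4 * k + 1 + 1) := by omega
    have hm2 : (4 * k + 1 + 1) % 4 = 2 := by omega
    have hnd3 : ¬ (4:Int) ∣ (4 * k + 1 + 1 + 1) := by omega
    have hm3 : (4 * k + 1 + 1 + 1) % 4 = 3 := by omega
    rcases T with _ | ⟨t0, _ | ⟨t1, _ | ⟨t2, _ | ⟨t3, T'⟩⟩⟩⟩
    · simp [evenAcc]
    · simp [PySem.List.enumerate_cons, hdvd0, evenAcc, emodAdd]
    · simp [PySem.List.enumerate_cons, hdvd0, hnd1, hm1, evenAcc, emodAdd]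
    · simp [PySem.List.enumerate_cons, hdvd0, hnd1, hm1, hnd2, hm2, evenAcc, emodAdd, emodMul]
    · have hlen' : T'.length ≤ n := by simp at h; omega
      have H := ih T' (k + 1) ((x + t0) * t2) ((y + t1) * t3) hlen'
      simp at H
      have hs : 4 * k + 1 + 1 + 1 + 1 = 4 * (k + 1) := by ring
      simp [PySem.List.enumerate_cons, hdvd0, hnd1, hm1, hnd2, hm2, hnd3, hm3,
        emodAdd, emodMul, hs, evenAcc]
      rw [H]
      rcases T' with _ | ⟨e, T''⟩ <;> simp [evenAcc]

-- ===== VERDICT (by name: the statement is the Claim_ definition above) =====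
theorem plusMult_spec : Claim_equal_plusMult := by
  intro A _
  show plusMult A = plusMult_alt A
  have hE := foldA_fuel A A.length 0 0 (by omega)
  have hO := foldA_fuel A A.length 1 0 (by omega)
  have hB := foldB_fuel A.length A 0 0 0 le_rfl
  norm_num at hE hO
  rw [show (4:Int) * 0 = 0 from by ring] at hB
  rw [show PySem.Int.mod (0:Int) 2 = 0 from by decide] at hB
  simp only [plusMult, plusMult_alt]
  rw [hE, hO, hB]
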